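-- pv_equiv track=rewrite | github.com/MathKode/ChooseMyLife | ChooseMyLife/ChooseMyLife/sort_alphabet_test.py | _compare_word
-- ===== SOURCE A (Python) =====
-- def _position(lettre, alphabet):
--     t=0
--     for i in alphabet:
--         if i==lettre:
--             return t
--         t+=1
--     return 0
--
-- def _compare_letter(l1,l2, alphabet):
--     if l1 not in alphabet: l1=alphabet[-1]
--     if l2 not in alphabet: l2=alphabet[-1]
--     n1 = _position(l1, alphabet)
--     n2 = _position(l2, alphabet)
--     if n1 > n2:
--         return 0
--     elif n1 == n2:
--         return 1
--     else: #n2>n1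
--         return 2
--
-- def _compare_word(w1,w2,alphabet):
--     t=0
--     for l1 in w1:
--         try:
--             l2=w2[t]
--         except:
--             l2=alphabet[-1]
--         comp = _compare_letter(l1,l2, alphabet)
--         if comp == 0:
--             return w1
--         if comp == 2:
--             return w2
--         t+=1
--     return w1
-- ===== SOURCE B (Python) =====
-- def _compare_word(w1, w2, alphabet):
--     rank = {}
--     for i, c in enumerate(alphabet):
--         rank.setdefault(c, i)
--     if not w1:
--         return w1
--     last = rank[alphabet[-1]]
--     n2 = len(w2)
--     seq1 = [rank.get(c, last) for c in w1]
--     seq2 = [rank.get(w2[i], last) if i < n2 else last for i in range(len(w1))]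
--     return w1 if seq1 >= seq2 else w2
-- ===== Notes on version B (the rewrite author's own statement) =====
-- stated objective: faster
-- what changed: Replaces the per-letter membership re-tests and linear _position scans of the alphabet with a first-occurrence rank dict built once (setdefault), then compares the two equal-length rank sequences with Python's built-in lexicographic list comparison instead of the explicit early-return loop.
import Mathlib
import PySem

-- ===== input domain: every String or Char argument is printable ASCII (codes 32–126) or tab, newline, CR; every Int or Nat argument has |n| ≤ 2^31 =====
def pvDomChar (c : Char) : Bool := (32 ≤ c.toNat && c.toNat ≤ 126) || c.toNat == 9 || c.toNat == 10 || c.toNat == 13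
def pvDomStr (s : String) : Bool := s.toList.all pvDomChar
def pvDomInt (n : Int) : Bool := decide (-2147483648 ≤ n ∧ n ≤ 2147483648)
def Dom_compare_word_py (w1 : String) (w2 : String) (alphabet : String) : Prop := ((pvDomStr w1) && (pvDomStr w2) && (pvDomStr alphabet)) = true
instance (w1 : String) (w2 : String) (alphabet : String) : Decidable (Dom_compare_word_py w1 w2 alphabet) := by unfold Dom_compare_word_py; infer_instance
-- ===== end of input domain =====

-- B replaces A's per-letter alphabet scans and early-return loop by a first-occurrence rank
-- dict built once and a lexicographic comparison of two equal-length rank sequences (measured faster).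


-- ===== PORT A =====
-- _position: linear scan with a running counter t
def pyPositionGo (lettre : Char) : List Char → Int → Int
  | [], _ => 0
  | i :: rest, t => if i = lettre then t else pyPositionGo lettre rest (t + 1)

def pyPosition (lettre : Char) (alphabet : List Char) : Int :=
  pyPositionGo lettre alphabet 0

-- _compare_letter; alphabet[-1] is only reached with a nonempty alphabet inside Pre_ (getLastD ' ' there)
def pyCompareLetter (l1 l2 : Char) (alphabet : List Char) : Int :=
  let l1 := if l1 ∈ alphabet then l1 else alphabet.getLastD ' '
  let l2 := if l2 ∈ alphabet then l2 else alphabet.getLastD ' '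
  let n1 := pyPosition l1 alphabet
  let n2 := pyPosition l2 alphabet
  if n1 > n2 then 0 else if n1 = n2 then 1 else 2

-- the for-loop over w1 with counter t; try w2[t] / except -> alphabet[-1]
def cwGo (w1 w2 : String) (w2l al : List Char) : List Char → Int → String
  | [], _ => w1
  | l1 :: rest, t =>
    let l2 := match PySem.List.pyGet? w2l t with
      | some c => c
      | none => al.getLastD ' '
    let comp := pyCompareLetter l1 l2 al
    if comp = 0 then w1
    else if comp = 2 then w2
    else cwGo w1 w2 w2l al rest (t + 1)

def compare_word_py (w1 : String) (w2 : String) (alphabet : String) : String :=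
  cwGo w1 w2 w2.toList alphabet.toList w1.toList 0

-- ===== PORT B =====
-- for i, c in enumerate(alphabet): rank.setdefault(c, i)
def buildRank : List Char → Int → PySem.Dict Char Int → PySem.Dict Char Int
  | [], _, d => d
  | c :: rest, i, d => buildRank rest (i + 1) (d.setdefault c i)

-- Python's list >= on equal-shape int lists (built-in lexicographic comparison)
def listGe : List Int → List Int → Bool
  | [], [] => true
  | [], _ :: _ => false
  | _ :: _, [] => true
  | a :: as_, b :: bs => if a > b then true else if a < b then false else listGe as_ bs

def compare_word_py_alt (w1 : String) (w2 : String) (alphabet : String) : String :=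
  let al := alphabet.toList
  let rank := buildRank al 0 PySem.Dict.empty
  if w1.toList.isEmpty then w1
  else
    let last := rank.getD (al.getLastD ' ') 0
    let n2 := w2.toList.length
    let seq1 := w1.toList.map (fun c => rank.getD c last)
    let seq2 := (List.range w1.toList.length).map (fun i =>
      if i < n2 then rank.getD (w2.toList.getD i ' ') last else last)
    if listGe seq1 seq2 then w1 else w2

-- ===== PRECONDITION & SPEC =====
-- Pre_ excludes exactly the inputs where Python A raises IndexError: alphabet == "" with w1 != ""
-- (alphabet[-1] is evaluated on the first letter of w1); B raises IndexError there too.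
def Pre_compare_word_py (w1 : String) (w2 : String) (alphabet : String) : Prop :=
  alphabet.toList ≠ [] ∨ w1.toList = []
instance (w1 : String) (w2 : String) (alphabet : String) : Decidable (Pre_compare_word_py w1 w2 alphabet) := by unfold Pre_compare_word_py; infer_instance

def pvWitness_compare_word_py : String × String × String := ("ba", "ab", "abc")

def Spec_compare_word_py (w1 : String) (w2 : String) (alphabet : String) (out : String) : Prop := out = compare_word_py_alt w1 w2 alphabet
instance (w1 : String) (w2 : String) (alphabet : String) (out : String) : Decidable (Spec_compare_word_py w1 w2 alphabet out) := by unfold Spec_compare_word_py; infer_instance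

-- ===== CLAIM (what is proved, stated in full; the proofs are below) =====
def Claim_equal_compare_word_py : Prop := ∀ (w1 : String) (w2 : String) (alphabet : String), Dom_compare_word_py w1 w2 alphabet → Pre_compare_word_py w1 w2 alphabet → Spec_compare_word_py w1 w2 alphabet (compare_word_py w1 w2 alphabet)

-- ===== LEMMAS AND PROOFS =====

-- first-occurrence index: A's _position
lemma pyPositionGo_of_mem (c : Char) (al : List Char) (h : c ∈ al) (t : Int) :
    pyPositionGo c al t = t + (al.idxOf c : Int) := by
  induction al generalizing t with
  | nil => simp at h
  | cons a rest ih =>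
    by_cases hc : a = c
    · subst hc; simp [pyPositionGo, List.idxOf_cons_self]
    · have hm : c ∈ rest := by
        rcases List.mem_cons.mp h with h1 | h1
        · exact absurd h1.symm hc
        · exact h1
      simp only [pyPositionGo, if_neg hc]
      rw [ih hm]
      rw [List.idxOf_cons_ne _ (by simpa using hc)]
      push_cast
      ring

-- B's rank dict is the first-occurrence index map
lemma buildRank_get? (al : List Char) (i : Int) (d : PySem.Dict Char Int) (c : Char) :
    (buildRank al i d).get? c =
      match d.get? c with
      | some v => some v
      | none => if c ∈ al then some (i + (al.idxOf c : Int)) else none := by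
  induction al generalizing i d with
  | nil => cases hd : d.get? c <;> simp [buildRank, hd]
  | cons a rest ih =>
    simp only [buildRank]
    rw [ih]
    by_cases hcont : d.contains a = true
    · have hsd : d.setdefault a i = d := by simp [PySem.Dict.setdefault, hcont]
      rw [hsd]
      cases hd : d.get? c with
      | some v => rfl
      | none =>
        have hca : c ≠ a := by
          rintro rfl
          rw [(PySem.Dict.get?_eq_none_iff_contains d c).mp hd] at hcont
          simp at hcont
        have hmem : (c ∈ a :: rest) ↔ c ∈ rest := by simp [hca]
        by_cases hm : c ∈ rest
        · rw [if_pos hm, if_pos (hmem.mpr hm), List.idxOf_cons_ne _ (by simpa using (Ne.symm hca))]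
          push_cast; ring_nf
        · rw [if_neg hm, if_neg (fun h => hm (hmem.mp h))]
    · have hcf : d.contains a = false := by simpa using hcont
      have hsd : d.setdefault a i = d.insert a i := by
        simp [PySem.Dict.setdefault, PySem.Dict.insert, hcf]
      have hda : d.get? a = none := (PySem.Dict.get?_eq_none_iff_contains d a).mpr hcf
      rw [hsd]
      by_cases hca : c = a
      · subst hca
        rw [PySem.Dict.get?_insert_self, hda]
        simp [List.idxOf_cons_self]
      · rw [PySem.Dict.get?_insert_of_ne _ _ hca]
        cases hd : d.get? c with
        | some v => rfl
        | none =>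
          have hmem : (c ∈ a :: rest) ↔ c ∈ rest := by simp [hca]
          by_cases hm : c ∈ rest
          · rw [if_pos hm, if_pos (hmem.mpr hm), List.idxOf_cons_ne _ (by simpa using (Ne.symm hca))]
            push_cast; ring_nf
          · rw [if_neg hm, if_neg (fun h => hm (hmem.mp h))]

-- the effective rank both programs compare: first index of c, unknown letters mapped to the last letter's first index
def effRank (al : List Char) (c : Char) : Int :=
  if c ∈ al then (al.idxOf c : Int) else (al.idxOf (al.getLastD ' ') : Int)

lemma rank_getD_eq_effRank (al : List Char) (hal : al ≠ []) (c : Char) :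
    (buildRank al 0 PySem.Dict.empty).getD c
      ((buildRank al 0 PySem.Dict.empty).getD (al.getLastD ' ') 0) = effRank al c := by
  have hlastmem : al.getLastD ' ' ∈ al := by
    rw [List.getLastD_eq_getLast?, List.getLast?_eq_some_getLast hal]
    exact List.getLast_mem hal
  have hget : ∀ x : Char, x ∈ al →
      (buildRank al 0 PySem.Dict.empty).get? x = some ((al.idxOf x : Int)) := by
    intro x hx
    rw [buildRank_get? al 0 PySem.Dict.empty x]
    simp [hx]
  have hlast : (buildRank al 0 PySem.Dict.empty).getD (al.getLastD ' ') 0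
      = (al.idxOf (al.getLastD ' ') : Int) := by
    simp only [PySem.Dict.getD]
    rw [hget _ hlastmem]
    rfl
  by_cases hc : c ∈ al
  · simp only [PySem.Dict.getD]
    rw [hget _ hc]
    simp [effRank, hc]
  · have hnone : (buildRank al 0 PySem.Dict.empty).get? c = none := by
      rw [buildRank_get? al 0 PySem.Dict.empty c]; simp [hc]
    simp only [PySem.Dict.getD] at hlast ⊢
    rw [hnone, Option.getD_none, hlast]
    simp [effRank, hc]

lemma rank_last (al : List Char) (hal : al ≠ []) :
    (buildRank al 0 PySem.Dict.empty).getD (al.getLastD ' ') 0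
      = effRank al (al.getLastD ' ') := by
  have hlastmem : al.getLast?.getD ' ' ∈ al := by
    rw [List.getLast?_eq_some_getLast hal]
    exact List.getLast_mem hal
  have hget : (buildRank al 0 PySem.Dict.empty).get? (al.getLastD ' ')
      = some ((al.idxOf (al.getLastD ' ') : Int)) := by
    rw [buildRank_get? al 0 PySem.Dict.empty (al.getLastD ' ')]
    simp [hlastmem]
  simp only [PySem.Dict.getD]
  rw [hget]
  simp [effRank, hlastmem]

-- A's letter comparison, characterised through effRank
lemma pyCompareLetter_eq (al : List Char) (hal : al ≠ []) (l1 l2 : Char) :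
    pyCompareLetter l1 l2 al =
      (if effRank al l1 > effRank al l2 then 0
       else if effRank al l1 = effRank al l2 then 1 else 2) := by
  have hlastmem : al.getLastD ' ' ∈ al := by
    rw [List.getLastD_eq_getLast?, List.getLast?_eq_some_getLast hal]
    exact List.getLast_mem hal
  have hpos : ∀ c : Char, pyPosition (if c ∈ al then c else al.getLastD ' ') al = effRank al c := by
    intro c
    by_cases hc : c ∈ al
    · simp only [if_pos hc, effRank, pyPosition]
      rw [pyPositionGo_of_mem c al hc 0]; simp
    · simp only [if_neg hc, effRank, pyPosition]
      rw [pyPositionGo_of_mem _ al hlastmem 0]; simp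
  simp only [pyCompareLetter]
  rw [hpos l1, hpos l2]

-- main loop invariant: A's scan from position j equals the lexicographic list comparison of the remaining rank sequences
lemma cwGo_eq_listGe (w1 w2 : String) (al : List Char) (hal : al ≠ [])
    (chars : List Char) (j : Nat) :
    cwGo w1 w2 w2.toList al chars (j : Int) =
      (if listGe (chars.map (effRank al))
          ((List.range' j chars.length).map (fun i =>
            if i < w2.toList.length then effRank al (w2.toList.getD i ' ') else effRank al (al.getLastD ' ')))
        then w1 else w2) := by
  induction chars generalizing j with
  | nil => simp [cwGo, listGe]
  | cons l1 rest ih =>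
    simp only [cwGo, List.map_cons, List.length_cons, List.range'_succ]
    have hl2 : (match PySem.List.pyGet? w2.toList (j : Int) with
        | some c => c
        | none => al.getLastD ' ') =
        (if j < w2.toList.length then w2.toList.getD j ' ' else al.getLastD ' ') := by
      by_cases hj : j < w2.toList.length
      · have hsome : PySem.List.pyGet? w2.toList (j : Int) = some (w2.toList.getD j ' ') := by
          rw [PySem.List.pyGet?_natCast, List.getD_eq_getElem?_getD, List.getElem?_eq_getElem hj]
          rfl
        rw [hsome, if_pos hj]
      · have hnone : PySem.List.pyGet? w2.toList (j : Int) = none := by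
          rw [PySem.List.pyGet?_natCast]
          exact List.getElem?_eq_none_iff.mpr (by omega)
        rw [hnone, if_neg hj]
    have hcomp : pyCompareLetter l1 (if j < w2.toList.length then w2.toList.getD j ' ' else al.getLastD ' ') al
        = (if effRank al l1 > (if j < w2.toList.length then effRank al (w2.toList.getD j ' ') else effRank al (al.getLastD ' ')) then 0 else if effRank al l1 = (if j < w2.toList.length then effRank al (w2.toList.getD j ' ') else effRank al (al.getLastD ' ')) then 1 else 2) := by
      rw [pyCompareLetter_eq al hal, apply_ite (effRank al)]
    rw [hl2, hcomp]
    have hcast : (j : Int) + 1 = ((j + 1 : Nat) : Int) := by push_cast; ring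
    rw [hcast, ih (j + 1)]
    simp only [listGe]
    rcases lt_trichotomy (effRank al l1) (if j < w2.toList.length then effRank al (w2.toList.getD j ' ') else effRank al (al.getLastD ' ')) with hlt | heq | hgt
    · have hng : ¬ (effRank al l1 > (if j < w2.toList.length then effRank al (w2.toList.getD j ' ') else effRank al (al.getLastD ' '))) := lt_asymm hlt
      have hne : effRank al l1 ≠ (if j < w2.toList.length then effRank al (w2.toList.getD j ' ') else effRank al (al.getLastD ' ')) := ne_of_lt hlt
      simp only [if_neg hng, if_neg hne, if_pos hlt]
      norm_num
    · have hng : ¬ (effRank al l1 > (if j < w2.toList.length then effRank al (w2.toList.getD j ' ') else effRank al (al.getLastD ' '))) := by rw [heq]; exact lt_irrefl _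
      have hnl : ¬ (effRank al l1 < (if j < w2.toList.length then effRank al (w2.toList.getD j ' ') else effRank al (al.getLastD ' '))) := by rw [heq]; exact lt_irrefl _
      simp only [if_neg hng, if_pos heq, if_neg hnl]
      norm_num
    · simp only [if_pos hgt]
      norm_num

-- ===== VERDICT (by name: the statement is the Claim_ definition above) =====
theorem compare_word_py_spec : Claim_equal_compare_word_py := by
  intro w1 w2 alphabet _ hpre
  unfold Spec_compare_word_py compare_word_py compare_word_py_alt
  cases hw1 : w1.toList with
  | nil => simp [cwGo]
  | cons c rest =>
    have hal : alphabet.toList ≠ [] := by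
      rcases hpre with h | h
      · exact h
      · rw [hw1] at h; simp at h
    have hcw := cwGo_eq_listGe w1 w2 alphabet.toList hal (c :: rest) 0
    rw [Nat.cast_zero] at hcw
    rw [hcw]
    simp only [List.isEmpty_cons, Bool.false_eq_true, if_false]
    have hr : ∀ x : Char,
        (buildRank alphabet.toList 0 PySem.Dict.empty).getD x
          ((buildRank alphabet.toList 0 PySem.Dict.empty).getD (alphabet.toList.getLastD ' ') 0)
        = effRank alphabet.toList x := rank_getD_eq_effRank alphabet.toList hal
    simp only [hr]
    simp only [rank_last alphabet.toList hal]
    rw [List.range_eq_range']
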